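-- pv_equiv track=rewrite | github.com/adefemi171/lazer-maze | lazerMaze.py | is_open_maze
-- ===== SOURCE A (Python) =====
-- def is_open_maze(grid, dim, col, row, last_direction):
--     if (col >= 0 or col < dim) and row >= dim:
--         return True
--
--     if row >= dim or row < 0 or col >= dim or col < 0:
--         return False
--
--     if grid[row][col] == 'L':
--         if last_direction == 'R': return False
--         if last_direction == 'L':
--             return is_open_maze(grid, dim, row+1, col, 'L')
--         return is_open_maze(grid, dim, row, col+1, 'L')
--     else:
--         if last_direction == 'L':
--             return False
--         if last_direction == 'R':
--             return is_open_maze(grid, dim, row+1, col, 'R')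
--         return is_open_maze(grid, dim, row, col-1, 'R')
--
--     return False
-- ===== SOURCE B (Python) =====
-- def _follow(grid, dim, c, r, want_l):
--     # Walk the committed-direction path until it leaves the board.
--     while 0 <= r < dim:
--         if c < 0 or c >= dim:
--             return False
--         if (grid[r][c] == 'L') != want_l:
--             return False
--         c, r = r + 1, c
--     return r >= dim
--
-- def is_open_maze(grid, dim, col, row, last_direction):
--     if row >= dim:
--         return True
--     if row < 0 or col >= dim or col < 0:
--         return False
--     want_l = grid[row][col] == 'L'
--     if last_direction in ('L', 'R'):
--         if (last_direction == 'L') != want_l: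
--             return False
--         return _follow(grid, dim, col, row, want_l)
--     if want_l:
--         return _follow(grid, dim, row, col + 1, True)
--     return _follow(grid, dim, row, col - 1, False)
-- ===== Notes on version B (the rewrite author's own statement) =====
-- stated objective: simpler
-- what changed: Replaces A's unbounded recursion with string direction state by a one-time boolean classification of the start cell plus an iterative while-loop follower; Pre_ excludes grids smaller than dim x dim with the start on the board, where A can raise IndexError.
-- intended difference: On inputs with dim <= col < 0 and row >= dim (possible only for negative dim) A returns False because the vacuous-looking conjunct (col >= 0 or col < dim) of its exit guard fails there, while B returns True: a row index at or past dim means the laser has left the maze, the intended reading of the exit test. — e.g. on is_open_maze([], -1, -1, 0, ""): A returns false, B returns true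
-- outside the precondition, e.g. on is_open_maze([['L', 'R', 'R', 'R'], ['L', 'R', 'L', 'R']], 4, 1, 0, ''): A returns False, B returns False
import Mathlib
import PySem

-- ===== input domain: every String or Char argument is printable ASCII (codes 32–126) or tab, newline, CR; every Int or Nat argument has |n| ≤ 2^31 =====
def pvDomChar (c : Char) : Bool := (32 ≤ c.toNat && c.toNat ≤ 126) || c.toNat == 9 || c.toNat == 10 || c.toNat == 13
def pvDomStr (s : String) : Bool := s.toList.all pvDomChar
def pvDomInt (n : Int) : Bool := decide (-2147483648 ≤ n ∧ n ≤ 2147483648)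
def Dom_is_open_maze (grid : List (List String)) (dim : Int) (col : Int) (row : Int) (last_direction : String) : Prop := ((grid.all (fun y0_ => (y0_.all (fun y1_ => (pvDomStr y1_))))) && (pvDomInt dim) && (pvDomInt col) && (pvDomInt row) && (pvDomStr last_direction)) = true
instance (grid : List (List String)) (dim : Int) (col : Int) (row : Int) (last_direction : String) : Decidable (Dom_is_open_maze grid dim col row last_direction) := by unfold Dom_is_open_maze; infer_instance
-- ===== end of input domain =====

-- B replaces A's recursion with string direction state by a one-time boolean
-- classification of the start cell plus an iterative follower loop (simpler decomposition);
-- on the degenerate corner dim ≤ col < 0 ∧ row ≥ dim B returns True where A returns False (see D_).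


-- ===== PORT A =====
def is_open_maze (grid : List (List String)) (dim : Int) (col : Int) (row : Int) (last_direction : String) : Bool :=
  if (col ≥ 0 ∨ col < dim) ∧ row ≥ dim then true
  else if row ≥ dim ∨ row < 0 ∨ col ≥ dim ∨ col < 0 then false
  else
    match PySem.List.pyGet? grid row with
    | none => false            -- IndexError in Python; outside Pre_
    | some rw =>
      match PySem.List.pyGet? rw col with
      | none => false          -- IndexError in Python; outside Pre_
      | some cell =>
        if cell = "L" then
          if last_direction = "R" then false
          else if last_direction = "L" then is_open_maze grid dim (row+1) col "L"
          else is_open_maze grid dim row (col+1) "L"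
        else
          if last_direction = "L" then false
          else if last_direction = "R" then is_open_maze grid dim (row+1) col "R"
          else is_open_maze grid dim row (col-1) "R"
termination_by (2*dim - col - row).toNat + (if last_direction = "L" ∨ last_direction = "R" then 0 else 2)
decreasing_by
  all_goals simp_all
  all_goals omega

-- ===== PORT B =====
-- port of Source B's _follow: the 'while 0 <= r < dim' loop becomes tail recursion on the
-- same (c, r) state; the loop terminates because c + r grows while staying below 2*dim.
def pvFollow (grid : List (List String)) (dim : Int) (c : Int) (r : Int) (wantL : Bool) : Bool :=
  if 0 ≤ r ∧ r < dim then
    if c < 0 ∨ c ≥ dim then false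
    else
      match PySem.List.pyGet? grid r with
      | none => false
      | some rw =>
        match PySem.List.pyGet? rw c with
        | none => false
        | some cell =>
          if (cell == "L") ≠ wantL then false
          else pvFollow grid dim (r+1) c wantL
  else decide (r ≥ dim)
termination_by (2*dim - c - r).toNat
decreasing_by simp_all; omega

-- Source B's want_l (= grid[row][col] == 'L') appears inlined as (cell == "L").
def is_open_maze_alt (grid : List (List String)) (dim : Int) (col : Int) (row : Int) (last_direction : String) : Bool :=
  if row ≥ dim then true
  else if row < 0 ∨ col ≥ dim ∨ col < 0 then false
  else
    match PySem.List.pyGet? grid row with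
    | none => false
    | some rw =>
      match PySem.List.pyGet? rw col with
      | none => false
      | some cell =>
        if last_direction = "L" ∨ last_direction = "R" then
          if (last_direction == "L") ≠ (cell == "L") then false
          else pvFollow grid dim col row (cell == "L")
        else if (cell == "L") then pvFollow grid dim row (col+1) true
        else pvFollow grid dim row (col-1) false

-- ===== PRECONDITION & SPEC =====
-- Pre_ excludes grids smaller than dim×dim when the start square is on the board: there
-- the laser can step onto a missing cell and A raises IndexError.  This is slightly
-- narrower than A's exact returning set (on some such small grids the path happens to
-- exit before reaching a missing cell and A still returns; B agrees there too — see cites).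
def Pre_is_open_maze (grid : List (List String)) (dim : Int) (col : Int) (row : Int) (last_direction : String) : Prop :=
  (dim ≤ grid.length ∧ ∀ rw ∈ grid, dim ≤ (rw.length : Int)) ∨
  (row ≥ dim ∨ row < 0 ∨ col ≥ dim ∨ col < 0)

instance (grid : List (List String)) (dim : Int) (col : Int) (row : Int) (last_direction : String) : Decidable (Pre_is_open_maze grid dim col row last_direction) := by
  unfold Pre_is_open_maze; infer_instance

def pvWitness_is_open_maze : List (List String) × Int × Int × Int × String := ([["L"]], 1, 0, 0, "")

-- On inputs with dim ≤ col < 0 and row ≥ dim (possible only for a negative dim) A returns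
-- False because its exit guard's vacuous-looking conjunct `(col >= 0 or col < dim)` fails
-- there, while B returns True: a row index at or past dim means the laser has left the
-- maze, which is the intended reading of that exit test.
def D_is_open_maze (grid : List (List String)) (dim : Int) (col : Int) (row : Int) (last_direction : String) : Prop :=
  dim ≤ col ∧ col < 0 ∧ dim ≤ row

instance (grid : List (List String)) (dim : Int) (col : Int) (row : Int) (last_direction : String) : Decidable (D_is_open_maze grid dim col row last_direction) := by
  unfold D_is_open_maze; infer_instance

def Spec_is_open_maze (grid : List (List String)) (dim : Int) (col : Int) (row : Int) (last_direction : String) (out : Bool) : Prop := ¬ D_is_open_maze grid dim col row last_direction → out = is_open_maze_alt grid dim col row last_direction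
instance (grid : List (List String)) (dim : Int) (col : Int) (row : Int) (last_direction : String) (out : Bool) : Decidable (Spec_is_open_maze grid dim col row last_direction out) := by unfold Spec_is_open_maze; infer_instance

def pvDiffWitness_is_open_maze : List (List String) × Int × Int × Int × String := ([], -1, -1, 0, "")
def pvDiffWitnessOut_is_open_maze : Bool × Bool := (false, true)

-- ===== CLAIM (what is proved, stated in full; the proofs are below) =====
def Claim_unchanged_is_open_maze : Prop := ∀ (grid : List (List String)) (dim : Int) (col : Int) (row : Int) (last_direction : String), Dom_is_open_maze grid dim col row last_direction → Pre_is_open_maze grid dim col row last_direction → Spec_is_open_maze grid dim col row last_direction (is_open_maze grid dim col row last_direction)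
def Claim_changed_is_open_maze : Prop := Dom_is_open_maze (pvDiffWitness_is_open_maze.1) (pvDiffWitness_is_open_maze.2.1) (pvDiffWitness_is_open_maze.2.2.1) (pvDiffWitness_is_open_maze.2.2.2.1) (pvDiffWitness_is_open_maze.2.2.2.2) ∧ Pre_is_open_maze (pvDiffWitness_is_open_maze.1) (pvDiffWitness_is_open_maze.2.1) (pvDiffWitness_is_open_maze.2.2.1) (pvDiffWitness_is_open_maze.2.2.2.1) (pvDiffWitness_is_open_maze.2.2.2.2) ∧ D_is_open_maze (pvDiffWitness_is_open_maze.1) (pvDiffWitness_is_open_maze.2.1) (pvDiffWitness_is_open_maze.2.2.1) (pvDiffWitness_is_open_maze.2.2.2.1) (pvDiffWitness_is_open_maze.2.2.2.2) ∧ is_open_maze (pvDiffWitness_is_open_maze.1) (pvDiffWitness_is_open_maze.2.1) (pvDiffWitness_is_open_maze.2.2.1) (pvDiffWitness_is_open_maze.2.2.2.1) (pvDiffWitness_is_open_maze.2.2.2.2) = pvDiffWitnessOut_is_open_maze.1 ∧ is_open_maze_alt (pvDiffWitness_is_open_maze.1) (pvDiffWitness_is_open_maze.2.1) (pvDiffWitness_is_open_maze.2.2.1)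 (pvDiffWitness_is_open_maze.2.2.2.1) (pvDiffWitness_is_open_maze.2.2.2.2) = pvDiffWitnessOut_is_open_maze.2 ∧ pvDiffWitnessOut_is_open_maze.1 ≠ pvDiffWitnessOut_is_open_maze.2
def Claim_exact_is_open_maze : Prop := ∀ (grid : List (List String)) (dim : Int) (col : Int) (row : Int) (last_direction : String), Dom_is_open_maze grid dim col row last_direction → Pre_is_open_maze grid dim col row last_direction → D_is_open_maze grid dim col row last_direction → is_open_maze grid dim col row last_direction ≠ is_open_maze_alt grid dim col row last_direction

-- ===== LEMMAS AND PROOFS =====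

-- In-range access on a full dim×dim grid always succeeds.
lemma pvGetCell (grid : List (List String)) (dim : Int)
    (hg : dim ≤ grid.length ∧ ∀ rw ∈ grid, dim ≤ (rw.length : Int))
    (r c : Int) (hr0 : 0 ≤ r) (hr : r < dim) (hc0 : 0 ≤ c) (hc : c < dim) :
    ∃ rw cell, PySem.List.pyGet? grid r = some rw ∧ PySem.List.pyGet? rw c = some cell := by
  obtain ⟨hlen, hrows⟩ := hg
  have hrlt : r.toNat < grid.length := by omega
  refine ⟨grid[r.toNat], ?_⟩
  have hrw : PySem.List.pyGet? grid r = some grid[r.toNat] := by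
    rw [PySem.List.pyGet?_of_nonneg (h := hr0)]
    simp [List.getElem?_eq_getElem hrlt]
  have hmem : grid[r.toNat] ∈ grid := List.getElem_mem _
  have hclen : (grid[r.toNat].length : Int) ≥ dim := hrows _ hmem
  have hclt : c.toNat < grid[r.toNat].length := by omega
  refine ⟨grid[r.toNat][c.toNat], hrw, ?_⟩
  rw [PySem.List.pyGet?_of_nonneg (h := hc0)]
  simp [List.getElem?_eq_getElem hclt]

-- Main invariant: from a state with a committed direction, A's recursion equals
-- B's follower loop (dim ≥ 1 because such a state only arises from an on-board start).
lemma pvFollow_eq (grid : List (List String)) (dim : Int)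
    (hg : dim ≤ grid.length ∧ ∀ rw ∈ grid, dim ≤ (rw.length : Int)) (hdim : 1 ≤ dim)
    (wantL : Bool) :
    ∀ (n : Nat) (c r : Int), (2*dim - c - r).toNat ≤ n →
      is_open_maze grid dim c r (if wantL then "L" else "R") = pvFollow grid dim c r wantL := by
  cases wantL with
  | true =>
    rw [show (if (true : Bool) = true then "L" else "R") = "L" from rfl]
    intro n
    induction n with
    | zero =>
      intro c r hn
      rw [is_open_maze, pvFollow]
      by_cases hr : r ≥ dim
      · rw [if_pos ⟨by omega, hr⟩, if_neg (by omega : ¬ (0 ≤ r ∧ r < dim))]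
        exact (decide_eq_true hr).symm
      · rw [if_neg (by omega : ¬ ((c ≥ 0 ∨ c < dim) ∧ r ≥ dim))]
        by_cases hout : r < 0
        · rw [if_pos (by omega : r ≥ dim ∨ r < 0 ∨ c ≥ dim ∨ c < 0),
              if_neg (by omega : ¬ (0 ≤ r ∧ r < dim))]
          exact (decide_eq_false (by omega)).symm
        · rw [if_pos (by omega : r ≥ dim ∨ r < 0 ∨ c ≥ dim ∨ c < 0),
              if_pos (by omega : 0 ≤ r ∧ r < dim), if_pos (by omega : c < 0 ∨ c ≥ dim)]
    | succ m ih =>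
      intro c r hn
      rw [is_open_maze, pvFollow]
      by_cases hr : r ≥ dim
      · rw [if_pos ⟨by omega, hr⟩, if_neg (by omega : ¬ (0 ≤ r ∧ r < dim))]
        exact (decide_eq_true hr).symm
      · rw [if_neg (by omega : ¬ ((c ≥ 0 ∨ c < dim) ∧ r ≥ dim))]
        by_cases hout : r < 0
        · rw [if_pos (by omega : r ≥ dim ∨ r < 0 ∨ c ≥ dim ∨ c < 0),
              if_neg (by omega : ¬ (0 ≤ r ∧ r < dim))]
          exact (decide_eq_false (by omega)).symm
        · by_cases hcout : c < 0 ∨ c ≥ dim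
          · rw [if_pos (by omega : r ≥ dim ∨ r < 0 ∨ c ≥ dim ∨ c < 0),
                if_pos (by omega : 0 ≤ r ∧ r < dim), if_pos hcout]
          · rw [if_neg (by omega : ¬ (r ≥ dim ∨ r < 0 ∨ c ≥ dim ∨ c < 0)),
                if_pos (by omega : 0 ≤ r ∧ r < dim), if_neg hcout]
            obtain ⟨rw1, cell, hrw1, hcell⟩ :=
              pvGetCell grid dim hg r c (by omega) (by omega) (by omega) (by omega)
            simp only [hrw1, hcell]
            by_cases hL : cell = "L"
            · rw [if_pos hL]
              have hwl : (cell == "L") = true := by simp [hL]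
              simp only [hwl]
              rw [if_neg (by simp : ¬ ((true : Bool) ≠ true))]
              simp only [reduceIte]
              exact ih (r+1) c (by omega)
            · have hwl : (cell == "L") = false := by simp [hL]
              rw [if_neg hL]
              simp [hwl]
  | false =>
    rw [show (if (false : Bool) = true then "L" else "R") = "R" from rfl]
    intro n
    induction n with
    | zero =>
      intro c r hn
      rw [is_open_maze, pvFollow]
      by_cases hr : r ≥ dim
      · rw [if_pos ⟨by omega, hr⟩, if_neg (by omega : ¬ (0 ≤ r ∧ r < dim))]
        exact (decide_eq_true hr).symm
      · rw [if_neg (by omega : ¬ ((c ≥ 0 ∨ c < dim) ∧ r ≥ dim))]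
        by_cases hout : r < 0
        · rw [if_pos (by omega : r ≥ dim ∨ r < 0 ∨ c ≥ dim ∨ c < 0),
              if_neg (by omega : ¬ (0 ≤ r ∧ r < dim))]
          exact (decide_eq_false (by omega)).symm
        · rw [if_pos (by omega : r ≥ dim ∨ r < 0 ∨ c ≥ dim ∨ c < 0),
              if_pos (by omega : 0 ≤ r ∧ r < dim), if_pos (by omega : c < 0 ∨ c ≥ dim)]
    | succ m ih =>
      intro c r hn
      rw [is_open_maze, pvFollow]
      by_cases hr : r ≥ dim
      · rw [if_pos ⟨by omega, hr⟩, if_neg (by omega : ¬ (0 ≤ r ∧ r < dim))]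
        exact (decide_eq_true hr).symm
      · rw [if_neg (by omega : ¬ ((c ≥ 0 ∨ c < dim) ∧ r ≥ dim))]
        by_cases hout : r < 0
        · rw [if_pos (by omega : r ≥ dim ∨ r < 0 ∨ c ≥ dim ∨ c < 0),
              if_neg (by omega : ¬ (0 ≤ r ∧ r < dim))]
          exact (decide_eq_false (by omega)).symm
        · by_cases hcout : c < 0 ∨ c ≥ dim
          · rw [if_pos (by omega : r ≥ dim ∨ r < 0 ∨ c ≥ dim ∨ c < 0),
                if_pos (by omega : 0 ≤ r ∧ r < dim), if_pos hcout]
          · rw [if_neg (by omega : ¬ (r ≥ dim ∨ r < 0 ∨ c ≥ dim ∨ c < 0)),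
                if_pos (by omega : 0 ≤ r ∧ r < dim), if_neg hcout]
            obtain ⟨rw1, cell, hrw1, hcell⟩ :=
              pvGetCell grid dim hg r c (by omega) (by omega) (by omega) (by omega)
            simp only [hrw1, hcell]
            by_cases hL : cell = "L"
            · have hwl : (cell == "L") = true := by simp [hL]
              rw [if_pos hL]
              simp [hwl]
            · have hwl : (cell == "L") = false := by simp [hL]
              rw [if_neg hL]
              simp only [hwl]
              rw [if_neg (by simp : ¬ ((false : Bool) ≠ false)),
                  if_neg (by simp : ¬ ("R" : String) = "L"), if_pos trivial]
              exact ih (r+1) c (by omega)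

-- A = B outside D_.
lemma pvMainEq (grid : List (List String)) (dim : Int) (col : Int) (row : Int)
    (last_direction : String)
    (hpre : Pre_is_open_maze grid dim col row last_direction)
    (hnd : ¬ D_is_open_maze grid dim col row last_direction) :
    is_open_maze grid dim col row last_direction = is_open_maze_alt grid dim col row last_direction := by
  unfold D_is_open_maze at hnd
  rw [is_open_maze, is_open_maze_alt]
  by_cases hr : row ≥ dim
  · rw [if_pos ⟨by omega, hr⟩, if_pos hr]
  · rw [if_neg (by omega : ¬ ((col ≥ 0 ∨ col < dim) ∧ row ≥ dim)), if_neg hr]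
    by_cases hout : row < 0 ∨ col ≥ dim ∨ col < 0
    · rw [if_pos (by omega), if_pos hout]
    · rw [if_neg (by omega), if_neg hout]
      have hfull : dim ≤ grid.length ∧ ∀ rw ∈ grid, dim ≤ (rw.length : Int) := by
        rcases hpre with h | h
        · exact h
        · omega
      have hdim : 1 ≤ dim := by omega
      obtain ⟨rw1, cell, hrw1, hcell⟩ :=
        pvGetCell grid dim hfull row col (by omega) (by omega) (by omega) (by omega)
      simp only [hrw1, hcell]
      have key := pvFollow_eq grid dim hfull hdim
      by_cases hL : cell = "L"
      · rw [if_pos hL]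
        have hwl : (cell == "L") = true := by simp [hL]
        by_cases hdR : last_direction = "R"
        · rw [if_pos hdR, if_pos (Or.inr hdR),
              if_pos (by simp [hdR, hL] : (last_direction == "L") ≠ (cell == "L"))]
        · rw [if_neg hdR]
          by_cases hdL : last_direction = "L"
          · rw [if_pos hdL, if_pos (Or.inl hdL),
                if_neg (by simp [hdL, hL] : ¬ ((last_direction == "L") ≠ (cell == "L"))), hwl]
            have hstep : is_open_maze grid dim col row "L" = is_open_maze grid dim (row+1) col "L" := by
              conv_lhs => rw [is_open_maze]
              rw [if_neg (by omega : ¬ ((col ≥ 0 ∨ col < dim) ∧ row ≥ dim)),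
                  if_neg (by omega : ¬ (row ≥ dim ∨ row < 0 ∨ col ≥ dim ∨ col < 0))]
              simp only [hrw1, hcell]
              rw [if_pos hL, if_neg (by simp : ¬ ("L" : String) = "R"), if_pos trivial]
            rw [← hstep]
            simpa using key true (2*dim - col - row).toNat col row le_rfl
          · rw [if_neg hdL, if_neg (by tauto : ¬ (last_direction = "L" ∨ last_direction = "R")),
                if_pos hwl]
            simpa using key true (2*dim - row - (col+1)).toNat row (col+1) le_rfl
      · rw [if_neg hL]
        have hwl : (cell == "L") = false := by simp [hL]
        by_cases hdL : last_direction = "L"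
        · rw [if_pos hdL, if_pos (Or.inl hdL),
              if_pos (by simp [hdL, hL] : (last_direction == "L") ≠ (cell == "L"))]
        · rw [if_neg hdL]
          by_cases hdR : last_direction = "R"
          · rw [if_pos hdR, if_pos (Or.inr hdR),
                if_neg (by simp [hdR, hL] : ¬ ((last_direction == "L") ≠ (cell == "L"))), hwl]
            have hstep : is_open_maze grid dim col row "R" = is_open_maze grid dim (row+1) col "R" := by
              conv_lhs => rw [is_open_maze]
              rw [if_neg (by omega : ¬ ((col ≥ 0 ∨ col < dim) ∧ row ≥ dim)),
                  if_neg (by omega : ¬ (row ≥ dim ∨ row < 0 ∨ col ≥ dim ∨ col < 0))]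
              simp only [hrw1, hcell]
              rw [if_neg hL, if_neg (by simp : ¬ ("R" : String) = "L"), if_pos trivial]
            rw [← hstep]
            simpa using key false (2*dim - col - row).toNat col row le_rfl
          · rw [if_neg hdR, if_neg (by tauto : ¬ (last_direction = "L" ∨ last_direction = "R")),
                if_neg (by simp [hwl] : ¬ ((cell == "L") = true))]
            simpa using key false (2*dim - row - (col-1)).toNat row (col-1) le_rfl

-- ===== VERDICT (by name: the statement is the Claim_ definition above) =====
theorem is_open_maze_spec : Claim_unchanged_is_open_maze := by
  intro grid dim col row last_direction _ hpre hnd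
  exact pvMainEq grid dim col row last_direction hpre hnd

theorem is_open_maze_changed : Claim_changed_is_open_maze := by
  unfold Claim_changed_is_open_maze
  refine ⟨by decide, by decide, by decide, ?_, ?_, by decide⟩
  · show is_open_maze [] (-1) (-1) 0 "" = false
    rw [is_open_maze]
    rw [if_neg (by norm_num), if_pos (by norm_num)]
  · show is_open_maze_alt [] (-1) (-1) 0 "" = true
    rw [is_open_maze_alt, if_pos (by norm_num)]

theorem is_open_maze_tight : Claim_exact_is_open_maze := by
  intro grid dim col row last_direction _ _ hd
  obtain ⟨h1, h2, h3⟩ := hd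
  rw [is_open_maze, is_open_maze_alt]
  rw [if_neg (by omega : ¬ ((col ≥ 0 ∨ col < dim) ∧ row ≥ dim)),
      if_pos (by omega : row ≥ dim ∨ row < 0 ∨ col ≥ dim ∨ col < 0),
      if_pos (by omega : row ≥ dim)]
  simp
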